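-- pv_equiv track=rewrite | github.com/kevin-funderburg/alfred-workflow-search | getWorkflows.py | getHotKeys
-- ===== SOURCE A (Python) =====
-- import itertools
--
-- def getHotKeys(modVal):
--     cmd = 1048576
--     opt = 524288
--     ctrl = 262144
--     shft = 131072
--     fn = 8388608
--
--     hotKeyCombos = list()
--     modString = ""
--     a = [cmd, opt, ctrl, shft, fn]
--
--     for i in range(6):
--         hotKeyCombos += list(itertools.combinations(a, i))
--
--     for h in hotKeyCombos:
--         theSum = 0
--         for n in range(len(h)):
--             theSum += h[n]
--         if theSum == modVal:
--             for n in range(len(h)):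
--                 if h[n] == 0:
--                     mod = ""
--                 elif h[n] == cmd:
--                     mod = "⌘"
--                 elif h[n] == opt:
--                     mod = "⌥"
--                 elif h[n] == ctrl:
--                     mod = "⌃"
--                 elif h[n] == shft:
--                     mod = "⇧"
--                 elif h[n] == fn:
--                     mod = "Fn"
--                 else:
--                     mod = "unknown"
--                 modString += mod
--             return modString
--
--     return "error"
-- ===== SOURCE B (Python) =====
-- def getHotKeys(modVal):
--     pairs = [(1048576, "\u2318"), (524288, "\u2325"), (262144, "\u2303"),
--              (131072, "\u21e7"), (8388608, "Fn")]
--     table = {}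
--     for mask in range(32):
--         total = 0
--         syms = ""
--         for i, (bit, sym) in enumerate(pairs):
--             if mask >> i & 1:
--                 total += bit
--                 syms += sym
--         table[total] = syms
--     return table.get(modVal, "error")
-- ===== Notes on version B (the rewrite author's own statement) =====
-- stated objective: simpler
-- what changed: Replaces A's generate-all-combinations-then-rescan-and-sum search by a one-time table (bitmask subset-sum -> symbol string, one row per modifier subset) and a single dict lookup with 'error' default.
import Mathlib
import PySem

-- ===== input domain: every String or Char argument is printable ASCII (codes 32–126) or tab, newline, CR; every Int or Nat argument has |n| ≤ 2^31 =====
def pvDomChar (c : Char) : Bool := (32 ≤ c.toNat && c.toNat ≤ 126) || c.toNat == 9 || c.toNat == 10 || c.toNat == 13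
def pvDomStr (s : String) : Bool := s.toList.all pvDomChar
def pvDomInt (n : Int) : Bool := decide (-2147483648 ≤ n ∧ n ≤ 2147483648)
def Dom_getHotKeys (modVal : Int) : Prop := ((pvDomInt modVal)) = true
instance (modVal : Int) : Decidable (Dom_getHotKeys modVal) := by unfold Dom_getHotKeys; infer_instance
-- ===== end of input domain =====

-- B replaces A's enumerate-all-combinations scan by a one-time table (one row per modifier subset) and a single dict lookup; objective: simpler.

-- ===== PORT A =====
-- itertools.combinations over a list, in itertools' order
def pvCombinations : Nat → List Int → List (List Int)
  | 0, _ => [[]]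
  | _ + 1, [] => []
  | k + 1, x :: xs => (pvCombinations k xs).map (x :: ·) ++ pvCombinations (k + 1) xs

-- theSum loop: for n in range(len(h)): theSum += h[n]   (indices always in range)
def pvSumCombo (h : List Int) : Int :=
  (List.range h.length).foldl (fun s n => s + h.getD n 0) 0

-- the inner symbol-translation chain of A, applied at index n
def pvModOf (x : Int) : String :=
  if x = 0 then "" else
  if x = 1048576 then "⌘" else
  if x = 524288 then "⌥" else
  if x = 262144 then "⌃" else
  if x = 131072 then "⇧" else
  if x = 8388608 then "Fn" else "unknown"

-- modString building loop at the matching combo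
def pvBuildStr (h : List Int) : String :=
  (List.range h.length).foldl (fun s n => s ++ pvModOf (h.getD n 0)) ""

-- the 'for h in hotKeyCombos' scan, returning at the first matching sum
def pvScan (modVal : Int) : List (List Int) → Option String
  | [] => none
  | h :: rest => if pvSumCombo h = modVal then some (pvBuildStr h) else pvScan modVal rest

def getHotKeys (modVal : Int) : String :=
  let a : List Int := [1048576, 524288, 262144, 131072, 8388608]
  let hotKeyCombos := (List.range 6).foldl (fun acc i => acc ++ pvCombinations i a) []
  match pvScan modVal hotKeyCombos with
  | some s => s
  | none => "error"

-- ===== PORT B =====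
def pvPairs : List (Int × String) :=
  [(1048576, "⌘"), (524288, "⌥"), (262144, "⌃"), (131072, "⇧"), (8388608, "Fn")]

-- one row of the table: sum of selected bits and concatenated symbols for a mask
def pvRow (mask : Int) : Int × String :=
  pvPairs.zipIdx.foldl
    (fun (acc : Int × String) e =>
      if (mask >>> e.2) % 2 ≠ 0 then (acc.1 + e.1.1, acc.2 ++ e.1.2) else acc)
    (0, "")

def pvTable : PySem.Dict Int String :=
  (PySem.List.pyRange 0 32 1).foldl
    (fun d mask => let r := pvRow mask; d.insert r.1 r.2) PySem.Dict.empty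

def getHotKeys_alt (modVal : Int) : String :=
  PySem.Dict.getD pvTable modVal "error"

-- ===== PRECONDITION & SPEC =====
def Spec_getHotKeys (modVal : Int) (out : String) : Prop := out = getHotKeys_alt modVal
instance (modVal : Int) (out : String) : Decidable (Spec_getHotKeys modVal out) := by unfold Spec_getHotKeys; infer_instance

-- ===== CLAIM (what is proved, stated in full; the proofs are below) =====
def Claim_equal_getHotKeys : Prop := ∀ (modVal : Int), Dom_getHotKeys modVal → Spec_getHotKeys modVal (getHotKeys modVal)

-- ===== LEMMAS AND PROOFS =====

-- the 32 subset sums, in A's combination order (proof-only helper)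
def pvKeys : List Int := [0, 1048576, 524288, 262144, 131072, 8388608, 1572864, 1310720, 1179648, 9437184, 786432, 655360, 8912896, 393216, 8650752, 8519680, 1835008, 1703936, 9961472, 1441792, 9699328, 9568256, 917504, 9175040, 9043968, 8781824, 1966080, 10223616, 10092544, 9830400, 9306112, 10354688]

-- A's combos list, evaluated once
def pvCombos : List (List Int) :=
  (List.range 6).foldl (fun acc i => acc ++ pvCombinations i [1048576, 524288, 262144, 131072, 8388608]) []

theorem pvScan_none (modVal : Int) (L : List (List Int))
    (h : ∀ c ∈ L, pvSumCombo c ≠ modVal) : pvScan modVal L = none := by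
  induction L with
  | nil => rfl
  | cons c rest ih =>
    simp only [pvScan]
    rw [if_neg (h c (List.mem_cons_self))]
    exact ih (fun c' hc' => h c' (List.mem_cons_of_mem _ hc'))

theorem pvCombos_sums : pvCombos.map pvSumCombo = pvKeys := by decide

theorem pvTable_keys_sub : ∀ x ∈ pvTable.keys, x ∈ pvKeys := by decide

theorem pv_on_keys : ∀ k ∈ pvKeys, getHotKeys k = getHotKeys_alt k := by decide

theorem pv_main (modVal : Int) : getHotKeys modVal = getHotKeys_alt modVal := by
  by_cases hmem : modVal ∈ pvKeys
  · exact pv_on_keys modVal hmem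
  · -- A returns "error": no combo sums to modVal
    have hA : getHotKeys modVal = "error" := by
      show (match pvScan modVal pvCombos with | some s => s | none => "error") = "error"
      rw [pvScan_none modVal pvCombos]
      intro c hc hsum
      have hk : pvSumCombo c ∈ pvKeys := pvCombos_sums ▸ List.mem_map_of_mem (f := pvSumCombo) hc
      exact hmem (hsum ▸ hk)
    -- B returns "error": modVal is not a key of the table
    have hB : getHotKeys_alt modVal = "error" := by
      show PySem.Dict.getD pvTable modVal "error" = "error"
      apply PySem.Dict.getD_of_not_contains
      rw [PySem.Dict.contains_eq_decide_mem_keys]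
      simp only [decide_eq_false_iff_not]
      exact fun hk => hmem (pvTable_keys_sub modVal hk)
    rw [hA, hB]

-- ===== VERDICT (by name: the statement is the Claim_ definition above) =====
theorem getHotKeys_spec : Claim_equal_getHotKeys := by
  intro modVal _
  exact pv_main modVal
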